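-- pv_equiv track=rewrite | github.com/Wulfic/Cicada3301 | tools/archive/master_solver.py | generate_prime_key
-- ===== SOURCE A (Python) =====
-- from typing import List, Dict, Tuple, Optional
--
-- def generate_prime_key(length: int) -> List[int]:
--     """Generate key from consecutive primes mod 29"""
--     primes = []
--     n = 2
--     while len(primes) < length:
--         if all(n % p != 0 for p in primes if p * p <= n):
--             primes.append(n)
--         n += 1
--     return [p % 29 for p in primes[:length]]
-- ===== SOURCE B (Python) =====
-- from typing import List
--
-- def generate_prime_key(length: int) -> List[int]:
--     """Generate key from consecutive primes mod 29 (sieve of Eratosthenes,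
--     doubling the sieve bound until enough primes are found)."""
--     if length <= 0:
--         return []
--     limit = 2
--     while True:
--         sieve = [True] * (limit + 1)
--         sieve[0] = False
--         sieve[1] = False
--         i = 2
--         while i * i <= limit:
--             if sieve[i]:
--                 for j in range(i * i, limit + 1, i):
--                     sieve[j] = False
--             i += 1
--         primes = [m for m, flag in enumerate(sieve) if flag]
--         if len(primes) >= length:
--             return [p % 29 for p in primes[:length]]
--         limit *= 2
-- ===== Notes on version B (the rewrite author's own statement) =====
-- stated objective: faster
-- what changed: Replaced the incremental trial-division search (testing each candidate against all collected primes up to its square root) by a Sieve of Eratosthenes over a range whose bound doubles until it contains `length` primes.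
import Mathlib
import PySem

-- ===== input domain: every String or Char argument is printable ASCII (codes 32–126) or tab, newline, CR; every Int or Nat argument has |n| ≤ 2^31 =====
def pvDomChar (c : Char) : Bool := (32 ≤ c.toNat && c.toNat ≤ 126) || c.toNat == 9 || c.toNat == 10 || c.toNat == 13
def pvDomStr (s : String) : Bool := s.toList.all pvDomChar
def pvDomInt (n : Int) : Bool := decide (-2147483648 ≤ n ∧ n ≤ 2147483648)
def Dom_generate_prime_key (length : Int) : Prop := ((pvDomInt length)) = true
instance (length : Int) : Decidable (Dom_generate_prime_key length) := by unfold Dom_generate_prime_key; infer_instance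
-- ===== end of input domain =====

-- B replaces A's incremental trial-division prime search by a Sieve of Eratosthenes
-- whose bound doubles until it contains `length` primes (objective: faster).

-- ===== PORT A =====
-- `all(n % p != 0 for p in primes if p * p <= n)`
def pvTestA (primes : List Nat) (n : Nat) : Bool :=
  primes.all (fun p => if p * p ≤ n then decide (n % p ≠ 0) else true)

-- the `while len(primes) < length` loop; the fuel argument only makes the
-- recursion structural (it is chosen provably large enough at the call site)
def pvLoopA (length : Int) : Nat → List Nat → Nat → List Nat
  | 0, primes, _ => primes
  | fuel+1, primes, n =>
      if (primes.length : Int) < length then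
        (if pvTestA primes n then pvLoopA length fuel (primes ++ [n]) (n+1)
         else pvLoopA length fuel primes (n+1))
      else primes

def generate_prime_key (length : Int) : List Int :=
  ((pvLoopA length (2 ^ length.toNat) [] 2).take length.toNat).map (fun p => (p : Int) % 29)

-- ===== PORT B =====
-- `for j in range(i*i, limit+1, i): sieve[j] = False`  (0 < i is a totality guard; i ≥ 2 at every call)
def pvMark (limit i : Nat) (j : Nat) (s : Array Bool) : Array Bool :=
  if _h : 0 < i ∧ j ≤ limit then pvMark limit i (j + i) (s.set! j false) else s
termination_by limit + 1 - j
decreasing_by omega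

-- `while i * i <= limit: if sieve[i]: mark multiples; i += 1`
def pvSieveLoop (limit : Nat) (i : Nat) (s : Array Bool) : Array Bool :=
  if _h : i * i ≤ limit then
    pvSieveLoop limit (i+1) (if s.getD i false then pvMark limit i (i*i) s else s)
  else s
termination_by limit + 1 - i
decreasing_by
  rcases Nat.eq_zero_or_pos i with h0 | h0
  · omega
  · have hi : i ≤ i * i := Nat.le_mul_of_pos_left i h0
    omega

-- `sieve = [True]*(limit+1); sieve[0] = sieve[1] = False; ...`
def pvSieve (limit : Nat) : Array Bool :=
  pvSieveLoop limit 2 (((Array.replicate (limit+1) true).set! 0 false).set! 1 false)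

-- the outer `while True` doubling loop; fuel only makes it structural
def pvOuterB (length : Int) : Nat → Nat → List Int
  | 0, _ => []
  | fuel+1, limit =>
      let s := pvSieve limit
      let primes := (List.range (limit+1)).filter (fun m => s.getD m false)
      if length ≤ (primes.length : Int) then
        (primes.take length.toNat).map (fun p => (p : Int) % 29)
      else pvOuterB length fuel (limit * 2)

def generate_prime_key_alt (length : Int) : List Int :=
  if length ≤ 0 then [] else pvOuterB length (length.toNat + 1) 2

-- ===== PRECONDITION & SPEC =====
def Spec_generate_prime_key (length : Int) (out : List Int) : Prop := out = generate_prime_key_alt length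
instance (length : Int) (out : List Int) : Decidable (Spec_generate_prime_key length out) := by unfold Spec_generate_prime_key; infer_instance

-- ===== CLAIM (what is proved, stated in full; the proofs are below) =====
def Claim_equal_generate_prime_key : Prop := ∀ (length : Int), Dom_generate_prime_key length → Spec_generate_prime_key length (generate_prime_key length)

-- ===== LEMMAS AND PROOFS =====

/-- The primes below `N`, in increasing order (proof-side reference list). -/
def primesUpto (N : Nat) : List Nat := (List.range N).filter (fun m => decide (Nat.Prime m))

theorem primesUpto_prefix {N M : Nat} (h : N ≤ M) : primesUpto N <+: primesUpto M := by
  have hp : List.range N <+: List.range M := by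
    have ht := List.take_prefix N (List.range M)
    rwa [List.take_range, Nat.min_eq_left h] at ht
  exact List.IsPrefix.filter _ hp

theorem take_of_prefix {α : Type} {l1 l2 : List α} {L : Nat} (h : l1 <+: l2)
    (hL : L ≤ l1.length) : l2.take L = l1.take L := by
  obtain ⟨t, rfl⟩ := h
  rw [List.take_append_of_le_length hL]

theorem primesUpto_succ (n : Nat) :
    primesUpto (n+1) = primesUpto n ++ (if Nat.Prime n then [n] else []) := by
  unfold primesUpto
  rw [List.range_succ, List.filter_append]
  by_cases h : Nat.Prime n <;> simp [h]

theorem mem_primesUpto {N m : Nat} : m ∈ primesUpto N ↔ m < N ∧ Nat.Prime m := by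
  simp [primesUpto]

theorem testA_eq {n : Nat} (hn : 2 ≤ n) : pvTestA (primesUpto n) n = true ↔ Nat.Prime n := by
  unfold pvTestA
  rw [List.all_eq_true]
  constructor
  · intro hall
    by_contra hnp
    set p := n.minFac with hp
    have hpp : Nat.Prime p := Nat.minFac_prime (by omega)
    have hpd : p ∣ n := Nat.minFac_dvd n
    have hsq : p * p ≤ n := by
      have := Nat.minFac_sq_le_self (by omega) hnp
      simpa [pow_two] using this
    have hplt : p < n := by
      have h2p : 2 ≤ p := hpp.two_le
      nlinarith
    have hmem : p ∈ primesUpto n := mem_primesUpto.mpr ⟨hplt, hpp⟩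
    have := hall p hmem
    simp [hsq] at this
    exact this (Nat.eq_zero_of_dvd_of_lt hpd (by omega) ▸ (Nat.mod_eq_zero_of_dvd hpd))
  · intro hp q hq
    obtain ⟨hqlt, hqp⟩ := mem_primesUpto.mp hq
    by_cases hsq : q * q ≤ n
    · simp only [hsq, if_true]
      simp only [decide_eq_true_eq]
      intro hmod
      have hdvd : q ∣ n := Nat.dvd_of_mod_eq_zero hmod
      rcases (Nat.Prime.eq_one_or_self_of_dvd hp q hdvd) with h1 | h1
      · exact absurd h1 (by have := hqp.two_le; omega)
      · omega
    · simp [hsq]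

theorem primesUpto_len_mono {N M : Nat} (h : N ≤ M) :
    (primesUpto N).length ≤ (primesUpto M).length :=
  (primesUpto_prefix h).length_le

theorem primesUpto_len_lt {p N M : Nat} (hp : Nat.Prime p) (h1 : N ≤ p) (h2 : p < M) :
    (primesUpto N).length < (primesUpto M).length := by
  have e : primesUpto (p+1) = primesUpto p ++ [p] := by
    rw [primesUpto_succ, if_pos hp]
  have l1 : (primesUpto N).length ≤ (primesUpto p).length := primesUpto_len_mono h1
  have l2 : (primesUpto (p+1)).length ≤ (primesUpto M).length := primesUpto_len_mono (by omega)
  rw [e] at l2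
  simp at l2
  omega

theorem primesUpto_two_pow (k : Nat) : k ≤ (primesUpto (2^k + 1)).length := by
  induction k with
  | zero => omega
  | succ k ih =>
    obtain ⟨p, hp, hlt, hle⟩ := Nat.exists_prime_lt_and_le_two_mul (2^k) (by positivity)
    have := primesUpto_len_lt hp (show 2^k + 1 ≤ p by omega)
      (show p < 2^(k+1) + 1 by rw [pow_succ]; omega)
    omega

theorem loopA_correct (L : Nat) : ∀ (fuel n : Nat), 2 ≤ n →
    (primesUpto n).length ≤ L → L ≤ (primesUpto (n + fuel)).length →
    pvLoopA (L : Int) fuel (primesUpto n) n = (primesUpto (n + fuel)).take L := by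
  intro fuel
  induction fuel with
  | zero =>
    intro n hn hle hge
    have hlen : (primesUpto n).length = L := by
      simp only [Nat.add_zero] at hge; omega
    simp only [pvLoopA, Nat.add_zero]
    rw [← hlen, List.take_length]
  | succ fuel ih =>
    intro n hn hle hge
    simp only [pvLoopA]
    by_cases hlen : (primesUpto n).length < L
    · rw [if_pos (by exact_mod_cast hlen)]
      have harith : n + 1 + fuel = n + (fuel + 1) := by omega
      by_cases hp : Nat.Prime n
      · rw [if_pos ((testA_eq hn).mpr hp)]
        have e : primesUpto n ++ [n] = primesUpto (n+1) := by
          rw [primesUpto_succ, if_pos hp]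
        rw [e, ih (n+1) (by omega) (by rw [← e]; simp; omega) (by rw [harith]; exact hge),
          harith]
      · rw [if_neg (by rw [testA_eq hn]; exact hp)]
        have e : primesUpto n = primesUpto (n+1) := by
          rw [primesUpto_succ, if_neg hp, List.append_nil]
        rw [e, ih (n+1) (by omega) (by rw [← e]; exact hle) (by rw [harith]; exact hge),
          harith]
    · rw [if_neg (by exact_mod_cast hlen)]
      have hlenL : (primesUpto n).length = L := by omega
      rw [take_of_prefix (primesUpto_prefix (show n ≤ n + (fuel+1) by omega)) (by omega),
        ← hlenL, List.take_length]

def pvCrossed (i m : Nat) : Prop := ∃ d, 2 ≤ d ∧ d < i ∧ d ∣ m ∧ d * d ≤ m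

theorem pvMark_getD {limit i : Nat} (hi : 0 < i) : ∀ (j : Nat) (s : Array Bool),
    s.size = limit + 1 →
    (pvMark limit i j s).size = limit + 1 ∧
    ∀ m, (pvMark limit i j s).getD m false =
      (if j ≤ m ∧ m ≤ limit ∧ (m - j) % i = 0 then false else s.getD m false) := by
  suffices H : ∀ k j s, limit + 1 - j ≤ k → s.size = limit + 1 →
      (pvMark limit i j s).size = limit + 1 ∧
      ∀ m, (pvMark limit i j s).getD m false =
        (if j ≤ m ∧ m ≤ limit ∧ (m - j) % i = 0 then false else s.getD m false) by
    intro j s hs; exact H (limit+1) j s (by omega) hs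
  intro k
  induction k with
  | zero =>
    intro j s hk hs
    rw [pvMark, dif_neg (by omega)]
    exact ⟨hs, fun m => by rw [if_neg (by omega)]⟩
  | succ k ih =>
    intro j s hk hs
    by_cases hj : j ≤ limit
    · rw [pvMark, dif_pos ⟨hi, hj⟩]
      have hs' : (s.set! j false).size = limit + 1 := by
        simpa [Array.set!] using hs
      obtain ⟨ihsz, ihg⟩ := ih (j+i) (s.set! j false) (by omega) hs'
      refine ⟨ihsz, fun m => ?_⟩
      rw [ihg m]
      have hget' : (s.set! j false).getD m false = if m = j then false else s.getD m false := by
        by_cases hmj : m = j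
        · subst hmj
          simp [Array.set!, Array.getD_eq_getD_getElem?, Array.getElem?_setIfInBounds, hs,
            show m < limit + 1 by omega]
        · simp [Array.set!, Array.getD_eq_getD_getElem?, Array.getElem?_setIfInBounds,
            hmj, Ne.symm hmj]
      rw [hget']
      have hmod : ∀ x, ((x + i) % i) = x % i := fun x => Nat.add_mod_right x i
      by_cases h1 : j + i ≤ m ∧ m ≤ limit ∧ (m - (j + i)) % i = 0
      · rw [if_pos h1, if_pos ⟨by omega, h1.2.1, by
          have hx : m - j = (m - (j + i)) + i := by omega
          rw [hx, hmod, h1.2.2]⟩]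
      · rw [if_neg h1]
        by_cases hmj2 : m = j
        · rw [if_pos hmj2, if_pos ⟨by omega, by omega, by simp [hmj2]⟩]
        · rw [if_neg hmj2]
          by_cases h3 : j ≤ m ∧ m ≤ limit ∧ (m - j) % i = 0
          · exfalso
            apply h1
            obtain ⟨hjm, hml, hmd⟩ := h3
            have hij : i ∣ (m - j) := Nat.dvd_of_mod_eq_zero hmd
            have hpos : 0 < m - j := by omega
            have hle2 : i ≤ m - j := Nat.le_of_dvd hpos hij
            refine ⟨by omega, hml, ?_⟩
            have hx : m - j = (m - (j + i)) + i := by omega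
            rw [hx, hmod] at hmd
            exact hmd
          · rw [if_neg h3]
    · rw [pvMark, dif_neg (by omega)]
      exact ⟨hs, fun m => by rw [if_neg (by omega)]⟩

theorem inv_final {limit i : Nat} (hi2 : 2 ≤ i) (hgt : limit < i * i)
    (s : Array Bool)
    (hinv : ∀ m, m ≤ limit → (s.getD m false = true ↔ 2 ≤ m ∧ ¬ pvCrossed i m)) :
    ∀ m, m ≤ limit → (s.getD m false = true ↔ Nat.Prime m) := by
  intro m hm
  rw [hinv m hm]
  constructor
  · rintro ⟨h2m, hnc⟩
    by_contra hnp
    set d := m.minFac with hd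
    have hdp : Nat.Prime d := Nat.minFac_prime (by omega)
    have hdd : d ∣ m := Nat.minFac_dvd m
    have hsq : d * d ≤ m := by
      have := Nat.minFac_sq_le_self (by omega) hnp
      simpa [pow_two] using this
    have hdi : d < i := by
      rw [← Nat.mul_self_lt_mul_self_iff]
      omega
    exact hnc ⟨d, hdp.two_le, hdi, hdd, hsq⟩
  · intro hp
    refine ⟨hp.two_le, ?_⟩
    rintro ⟨d, h2d, hdi, hdd, hsq⟩
    rcases (Nat.Prime.eq_one_or_self_of_dvd hp d hdd) with h1 | h1
    · omega
    · subst h1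
      have := hp.two_le
      nlinarith

theorem sieveLoop_correct {limit : Nat} : ∀ (i : Nat) (s : Array Bool), 2 ≤ i →
    s.size = limit + 1 →
    (∀ m, m ≤ limit → (s.getD m false = true ↔ 2 ≤ m ∧ ¬ pvCrossed i m)) →
    ∀ m, m ≤ limit → ((pvSieveLoop limit i s).getD m false = true ↔ Nat.Prime m) := by
  suffices H : ∀ k i s, limit + 1 - i ≤ k → 2 ≤ i → s.size = limit + 1 →
      (∀ m, m ≤ limit → (s.getD m false = true ↔ 2 ≤ m ∧ ¬ pvCrossed i m)) →
      ∀ m, m ≤ limit → ((pvSieveLoop limit i s).getD m false = true ↔ Nat.Prime m) by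
    intro i s h2 hs hinv
    exact H (limit+1) i s (by omega) h2 hs hinv
  intro k
  induction k with
  | zero =>
    intro i s hk h2 hs hinv
    have hii : i ≤ i * i := Nat.le_mul_of_pos_left i (by omega)
    have hgt : limit < i * i := by omega
    rw [pvSieveLoop, dif_neg (by omega)]
    exact inv_final h2 hgt s hinv
  | succ k ih =>
    intro i s hk h2 hs hinv
    by_cases hlt : i * i ≤ limit
    · rw [pvSieveLoop, dif_pos hlt]
      have hii : i ≤ limit := le_trans (Nat.le_mul_of_pos_left i (by omega)) hlt
      by_cases hgi : s.getD i false = true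
      · rw [if_pos hgi]
        obtain ⟨hsz', hg'⟩ := pvMark_getD (limit := limit) (i := i) (by omega) (i*i) s hs
        refine ih (i+1) _ (by omega) (by omega) hsz' ?_
        intro m hm
        rw [hg' m]
        by_cases hc : i * i ≤ m ∧ m ≤ limit ∧ (m - i * i) % i = 0
        · rw [if_pos hc]
          have hdvd : i ∣ m := by
            have h1 : i ∣ (m - i * i) := Nat.dvd_of_mod_eq_zero hc.2.2
            have h2' : i ∣ i * i := Dvd.intro i rfl
            have : m = (m - i * i) + i * i := by omega
            rw [this]
            exact Nat.dvd_add h1 h2'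
          constructor
          · intro hf; exact absurd hf (by simp)
          · rintro ⟨_, hnc⟩
            exact absurd ⟨i, h2, by omega, hdvd, hc.1⟩ hnc
        · rw [if_neg hc]
          rw [hinv m hm]
          have : pvCrossed i m ↔ pvCrossed (i+1) m := by
            constructor
            · rintro ⟨d, hd⟩; exact ⟨d, hd.1, by omega, hd.2.2⟩
            · rintro ⟨d, h2d, hdi, hdd, hsq⟩
              rcases Nat.lt_succ_iff_lt_or_eq.mp hdi with hdi' | rfl
              · exact ⟨d, h2d, hdi', hdd, hsq⟩
              · refine absurd ⟨hsq, hm, ?_⟩ hc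
                exact Nat.mod_eq_zero_of_dvd (Nat.dvd_sub hdd (Dvd.intro d rfl))
          rw [this]
      · rw [if_neg hgi]
        have hcri : pvCrossed i i := by
          have := hinv i hii
          rw [Bool.not_eq_true] at hgi
          rw [hgi] at this
          have h' : ¬ (2 ≤ i ∧ ¬ pvCrossed i i) := by simp at this ⊢; tauto
          by_contra hnc
          exact h' ⟨h2, hnc⟩
        refine ih (i+1) s (by omega) (by omega) hs ?_
        intro m hm
        rw [hinv m hm]
        have : pvCrossed i m ↔ pvCrossed (i+1) m := by
          constructor
          · rintro ⟨d, hd⟩; exact ⟨d, hd.1, by omega, hd.2.2⟩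
          · rintro ⟨d, h2d, hdi, hdd, hsq⟩
            rcases Nat.lt_succ_iff_lt_or_eq.mp hdi with hdi' | rfl
            · exact ⟨d, h2d, hdi', hdd, hsq⟩
            · obtain ⟨e, h2e, hei, hed, hesq⟩ := hcri
              refine ⟨e, h2e, by omega, dvd_trans hed hdd, ?_⟩
              have : e * e < d * d := Nat.mul_self_lt_mul_self_iff.mpr hei
              omega
        rw [this]
    · rw [pvSieveLoop, dif_neg hlt]
      exact inv_final h2 (by omega) s hinv

theorem pvSieve_primes {limit : Nat} (h2 : 2 ≤ limit) :
    (List.range (limit+1)).filter (fun m => (pvSieve limit).getD m false) = primesUpto (limit+1) := by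
  have hsz : (((Array.replicate (limit+1) true).set! 0 false).set! 1 false).size = limit + 1 := by
    simp [Array.set!]
  have hinit : ∀ m, m ≤ limit →
      ((((Array.replicate (limit+1) true).set! 0 false).set! 1 false).getD m false = true
        ↔ 2 ≤ m ∧ ¬ pvCrossed 2 m) := by
    intro m hm
    have hnc : ¬ pvCrossed 2 m := by rintro ⟨d, h2d, hd2, _⟩; omega
    have hg : (((Array.replicate (limit+1) true).set! 0 false).set! 1 false).getD m false
        = (if 2 ≤ m then true else false) := by
      rcases Nat.lt_or_ge m 2 with hlt | hge
      · interval_cases m <;>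
          simp [Array.set!, Array.getD_eq_getD_getElem?, Array.getElem?_setIfInBounds,
            Array.getElem?_replicate, show 0 < limit by omega]
      · simp [Array.set!, Array.getD_eq_getD_getElem?, Array.getElem?_setIfInBounds,
          Array.getElem?_replicate, show m < limit + 1 by omega,
          show ¬ (1 = m) by omega, show ¬ (0 = m) by omega, hge]
    rw [hg]
    rcases Nat.lt_or_ge m 2 with hlt | hge
    · simp [show ¬ 2 ≤ m by omega]
    · simp [hge, hnc]
  have hcor := sieveLoop_correct 2 _ (le_refl 2) hsz hinit
  unfold primesUpto
  refine List.filter_congr ?_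
  intro m hmem
  have hm : m ≤ limit := by
    have := List.mem_range.mp hmem
    omega
  have hiff := hcor m hm
  show (pvSieve limit).getD m false = decide (Nat.Prime m)
  unfold pvSieve
  by_cases hp : Nat.Prime m
  · rw [hiff.mpr hp]
    simp [hp]
  · have hfalse : (pvSieveLoop limit 2 (((Array.replicate (limit+1) true).set! 0 false).set! 1 false)).getD m false = false := by
      rcases Bool.eq_false_or_eq_true ((pvSieveLoop limit 2 (((Array.replicate (limit+1) true).set! 0 false).set! 1 false)).getD m false) with h | h
      · exact absurd (hiff.mp h) hp
      · exact h
    rw [hfalse]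
    simp [hp]

theorem take_firstPrimes {L N : Nat} (hN : L ≤ (primesUpto N).length) :
    (primesUpto N).take L = (primesUpto (2^L + 1)).take L := by
  have hL2 := primesUpto_two_pow L
  rcases le_total N (2^L+1) with h | h
  · exact (take_of_prefix (primesUpto_prefix h) hN).symm
  · exact take_of_prefix (primesUpto_prefix h) hL2

theorem pvOuterB_correct (L : Nat) (hL : 1 ≤ L) : ∀ (fuel limit : Nat), 2 ≤ limit →
    L ≤ (primesUpto (limit * 2^fuel + 1)).length →
    pvOuterB (L : Int) (fuel+1) limit
      = ((primesUpto (2^L + 1)).take L).map (fun p => (p : Int) % 29) := by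
  intro fuel
  induction fuel with
  | zero =>
    intro limit h2 hlen
    simp only [pow_zero, Nat.mul_one] at hlen
    simp only [pvOuterB, pvSieve_primes h2]
    rw [if_pos (by exact_mod_cast hlen)]
    rw [show ((L : Int)).toNat = L from Int.toNat_natCast L]
    rw [take_firstPrimes hlen]
  | succ fuel ih =>
    intro limit h2 hlen
    simp only [pvOuterB, pvSieve_primes h2]
    by_cases hnow : L ≤ (primesUpto (limit+1)).length
    · rw [if_pos (by exact_mod_cast hnow)]
      rw [show ((L : Int)).toNat = L from Int.toNat_natCast L]
      rw [take_firstPrimes hnow]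
    · rw [if_neg (by exact_mod_cast hnow)]
      refine ih (limit * 2) (by omega) ?_
      have : limit * 2 * 2^fuel = limit * 2^(fuel+1) := by ring
      rw [this]
      exact hlen

-- ===== VERDICT (by name: the statement is the Claim_ definition above) =====
theorem primesUpto_two : primesUpto 2 = [] := by decide

theorem generate_prime_key_spec : Claim_equal_generate_prime_key := by
  intro length _dom
  unfold Spec_generate_prime_key generate_prime_key generate_prime_key_alt
  by_cases hL : length ≤ 0
  · rw [if_pos hL]
    have h0 : length.toNat = 0 := Int.toNat_of_nonpos hL
    rw [h0]
    simp
  · rw [if_neg hL]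
    have hpos : 0 < length := by omega
    set L := length.toNat with hLdef
    have hcast : (L : Int) = length := Int.toNat_of_nonneg (by omega)
    have hL1 : 1 ≤ L := by omega
    have hL2 := primesUpto_two_pow L
    -- A side
    have hAfuel : L ≤ (primesUpto (2 + 2^L)).length :=
      le_trans hL2 (primesUpto_len_mono (by omega))
    have hA : pvLoopA (L : Int) (2^L) (primesUpto 2) 2 = (primesUpto (2 + 2^L)).take L :=
      loopA_correct L (2^L) 2 (le_refl 2) (by rw [primesUpto_two]; simp) hAfuel
    rw [primesUpto_two] at hA
    -- B side
    have hBlen : L ≤ (primesUpto (2 * 2^L + 1)).length :=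
      le_trans hL2 (primesUpto_len_mono (by have := Nat.one_le_two_pow (n := L); omega))
    have hB : pvOuterB (L : Int) (L + 1) 2 = ((primesUpto (2^L + 1)).take L).map (fun p => (p : Int) % 29) := by
      have := pvOuterB_correct L hL1 L 2 (le_refl 2) hBlen
      exact this
    rw [← hcast, hB, hA, take_firstPrimes hAfuel, List.take_take]
    simp
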